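-- pv_equiv track=rewrite | github.com/hyemco/Algorithm | BOJ/Silver/9079. 동전 게임/9079_동전 게임.py | bfs
-- ===== SOURCE A (Python) =====
-- from collections import deque
--
-- def bfs(arr):
--     cases = [(0, 1, 2), (3, 4, 5), (6, 7, 8), (0, 3, 6),
--     (1, 4, 7), (2, 5, 8), (0, 4, 8), (2, 4, 6)]
--
--
--     visited = [False] * 512       # 동전 배치 경우의 수 : 9자리 2^9
--     visited[int(''.join(arr), 2)] = True
--
--     Q = deque([(int(''.join(arr), 2), 0)])
--     while Q:
--         idx, count = Q.popleft()
--
--         if idx == 0 or idx == 511: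
--             return count
--
--         for nums in cases:
--             newArr = change(nums, list(bin(idx)[2:].zfill(9)))
--             vs = int(''.join(newArr), 2)
--             if not visited[vs]:
--                 visited[vs] = True
--                 Q.append((int(''.join(newArr), 2), count + 1))
--
--     return -1
--
-- def change(nums, arr):
--     for num in nums:
--         if arr[num] == '1':
--             arr[num] = '0'
--         else:
--             arr[num] = '1'
--     return arr
-- ===== SOURCE B (Python) =====
-- def bfs(arr):
--     masks = [0b111000000, 0b000111000, 0b000000111,
--              0b100100100, 0b010010010, 0b001001001,
--              0b100010001, 0b001010100]
--     s = int(''.join(arr), 2)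
--     best = -1
--     for m in range(256):
--         t = s
--         for i in range(8):
--             if (m >> i) & 1:
--                 t ^= masks[i]
--         if t == 0 or t == 511:
--             c = bin(m).count('1')
--             if best == -1 or c < best:
--                 best = c
--     return best
-- ===== Notes on version B (the rewrite author's own statement) =====
-- stated objective: alternative
-- what changed: Replaces A's BFS (deque + visited array over the 512 coin states, re-rendering each state through bin/zfill strings) by a direct enumeration of all 256 subsets of the 8 toggle operations: the operations are commuting involutions, so the minimum number of moves to a uniform board is the minimum popcount of a subset whose XOR sends the start state to 0 or 511, and -1 if none does.
import Mathlib
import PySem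

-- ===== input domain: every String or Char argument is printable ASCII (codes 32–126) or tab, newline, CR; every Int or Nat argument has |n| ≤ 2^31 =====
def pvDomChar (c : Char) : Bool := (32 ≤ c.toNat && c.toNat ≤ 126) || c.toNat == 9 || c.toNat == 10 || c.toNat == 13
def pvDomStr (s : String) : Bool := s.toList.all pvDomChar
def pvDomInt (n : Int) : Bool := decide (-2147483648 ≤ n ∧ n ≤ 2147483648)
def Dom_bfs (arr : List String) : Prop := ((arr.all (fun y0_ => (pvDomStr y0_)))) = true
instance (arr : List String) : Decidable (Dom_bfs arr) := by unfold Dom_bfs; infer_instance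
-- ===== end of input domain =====

set_option maxRecDepth 100000
set_option maxHeartbeats 8000000

-- B replaces A's BFS over coin states by enumerating all 256 subsets of the 8 commuting toggle
-- operations and taking the minimum subset size reaching a uniform board (objective: alternative).

-- ===== PORT A =====
def pvCases : List (Int × Int × Int) := [(0,1,2),(3,4,5),(6,7,8),(0,3,6),(1,4,7),(2,5,8),(0,4,8),(2,4,6)]

-- helper `change`: flips arr[num] for each num; the indices are the nonnegative literals 0..8,
-- in range on the 9-char lists this is applied to (pySetD/pyGetD are exact there)
def change (nums : Int × Int × Int) (arr : List Char) : List Char :=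
  [nums.1, nums.2.1, nums.2.2].foldl
    (fun a num => PySem.List.pySetD a num (if PySem.List.pyGetD a num ' ' = '1' then '0' else '1')) arr

-- list(bin(idx)[2:].zfill(9)); the slice [2:] with a nonnegative start is List.drop 2 (exact)
def binArr9 (idx : Int) : List Char := PySem.Chars.zfill ((PySem.Int.toBinChars0b idx).drop 2) 9

-- int(''.join(l), 2); Python raises ValueError exactly where ofCharsBase? is none — such inputs
-- are excluded by Pre_bfs, and inside the loop the argument is always 9 binary digits (some case)
def intBase2 (l : List Char) : Int := (PySem.Int.ofCharsBase? l 2).getD 0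

-- the while-loop over the deque; fuel only makes the recursion structural: at most 512 states are
-- ever enqueued (each is marked visited on enqueue), so 1024 dequeues can never be exhausted
def bfsLoop : Nat → List Bool → List (Int × Int) → Int
  | 0, _, _ => -1
  | _+1, _, [] => -1
  | fuel+1, visited, (idx, count) :: rest =>
    if idx = 0 ∨ idx = 511 then count
    else
      let st := pvCases.foldl (fun (st : List Bool × List (Int × Int)) nums =>
        let newArr := change nums (binArr9 idx)
        let vs := intBase2 newArr
        if PySem.List.pyGetD st.1 vs false then st
        else (PySem.List.pySetD st.1 vs true, st.2 ++ [(intBase2 newArr, count + 1)])) (visited, rest)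
      bfsLoop fuel st.1 st.2

def bfs (arr : List String) : Int :=
  -- int(''.join(arr), 2) (Python evaluates this same pure expression twice)
  let s := (PySem.Int.ofCharsBase? ((arr.map String.toList).flatten) 2).getD 0
  -- visited[s] = True on [False]*512; s is in [0, 512) on every input Pre_bfs admits
  bfsLoop 1024 (PySem.List.pySetD (List.replicate 512 false) s true) [(s, 0)]

-- ===== PORT B =====
def pvMasks : List Nat := [448, 56, 7, 292, 146, 73, 273, 84]

-- bin(m).count('1')
def altCount (m : Nat) : Int := ((PySem.Int.toBinChars0b (m : Int)).count '1' : Int)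

-- the two range-loops of Source B; on every input Pre_bfs admits s ≥ 0 holds, and Python's
-- int bit operations on nonnegative ints are exactly Nat's ^^^, >>>, &&& (masks[i] is in range)
def altFrom (n : Nat) : Int :=
  (List.range 256).foldl (fun (best : Int) (m : Nat) =>
    let t := (List.range 8).foldl (fun (t : Nat) (i : Nat) =>
      if (m >>> i) &&& 1 = 1 then t ^^^ pvMasks.getD i 0 else t) n
    if t = 0 ∨ t = 511 then
      let c := altCount m
      if best = -1 ∨ c < best then c else best
    else best) (-1)

def bfs_alt (arr : List String) : Int :=
  let s := (PySem.Int.ofCharsBase? ((arr.map String.toList).flatten) 2).getD 0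
  altFrom s.toNat

-- ===== PRECONDITION & SPEC =====
-- Pre_bfs admits exactly the inputs on which A returns: ''.join(arr) must parse under int(·, 2)
-- (else ValueError) to a value in [0, 512): a value ≥ 512 raises IndexError at visited[·], and a
-- negative value always reaches int() on a string still containing the 'b' of bin() (ValueError)
-- or an out-of-range visited index (IndexError).
def Pre_bfs (arr : List String) : Prop :=
  (PySem.Int.ofCharsBase? ((arr.map String.toList).flatten) 2).isSome = true ∧
  0 ≤ (PySem.Int.ofCharsBase? ((arr.map String.toList).flatten) 2).getD 0 ∧
  (PySem.Int.ofCharsBase? ((arr.map String.toList).flatten) 2).getD 0 < 512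
instance (arr : List String) : Decidable (Pre_bfs arr) := by unfold Pre_bfs; infer_instance

def pvWitness_bfs : List String := ["110", "010101"]

def Spec_bfs (arr : List String) (out : Int) : Prop := out = bfs_alt arr
instance (arr : List String) (out : Int) : Decidable (Spec_bfs arr out) := by unfold Spec_bfs; infer_instance

-- ===== CLAIM (what is proved, stated in full; the proofs are below) =====
def Claim_equal_bfs : Prop := ∀ (arr : List String), Dom_bfs arr → Pre_bfs arr → Spec_bfs arr (bfs arr)

-- ===== LEMMAS AND PROOFS =====

-- the 9-bit binary rendering of x, msb first
def bits9 (x : Nat) : List Char :=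
  (List.range 9).map (fun i => if (x >>> (8 - i)) &&& 1 = 1 then '1' else '0')

theorem d1a : ∀ x : Nat, x < 512 → binArr9 (x : Int) = bits9 x := by decide

theorem d1b : ∀ x : Nat, x < 512 → ∀ pr ∈ pvCases.zip pvMasks,
    change pr.1 (bits9 x) = bits9 (x ^^^ pr.2) := by decide

theorem d1c : ∀ x : Nat, x < 512 → intBase2 (bits9 x) = (x : Int) := by decide

theorem f5 : ∀ mk ∈ pvMasks, mk < 512 := by decide

theorem xor_lt {x mk : Nat} (hx : x < 512) (hm : mk < 512) : x ^^^ mk < 512 := by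
  have : (512 : Nat) = 2 ^ 9 := by norm_num
  rw [this] at hx hm ⊢
  exact Nat.xor_lt_two_pow hx hm

theorem zip_snd_mem {pr : (Int × Int × Int) × Nat} (hpr : pr ∈ pvCases.zip pvMasks) :
    pr.2 ∈ pvMasks := by
  obtain ⟨p, mk⟩ := pr
  exact (List.of_mem_zip hpr).2

theorem nbr_eq (x : Nat) (hx : x < 512) {pr : (Int × Int × Int) × Nat}
    (hpr : pr ∈ pvCases.zip pvMasks) :
    intBase2 (change pr.1 (binArr9 (x : Int))) = ((x ^^^ pr.2 : Nat) : Int) := by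
  have hm : pr.2 < 512 := f5 _ (zip_snd_mem hpr)
  rw [d1a x hx, d1b x hx pr hpr, d1c _ (xor_lt hx hm)]

-- proof-side BFS over Nat states: visited is a bitmask, the deque is a (front, back) pair
def natLoop : Nat → Nat → List (Nat × Int) → List (Nat × Int) → Int
  | 0, _, _, _ => -1
  | fuel+1, seen, f, b =>
    match if f.isEmpty then (b.reverse, ([] : List (Nat × Int))) else (f, b) with
    | ([], _) => -1
    | ((x, c) :: rest, back) =>
      if x = 0 ∨ x = 511 then c
      else
        let st := pvMasks.foldl (fun (st : Nat × List (Nat × Int)) mk =>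
          let vs := x ^^^ mk
          if st.1.testBit vs then st
          else (st.1 ||| (1 <<< vs), (vs, c + 1) :: st.2)) (seen, back)
        natLoop fuel st.1 rest st.2

def pvV : List Nat := [0, 7, 10, 13, 16, 23, 26, 29, 34, 37, 40, 47, 50, 53, 56, 63, 67, 68, 73, 78, 83, 84, 89, 94, 97, 102, 107, 108, 113, 118, 123, 124, 130, 133, 136, 143, 146, 149, 152, 159, 160, 167, 170, 173, 176, 183, 186, 189, 193, 198, 203, 204, 209, 214, 219, 220, 227, 228, 233, 238, 243, 244, 249, 254, 257, 262, 267, 268, 273, 278, 283, 284, 291, 292, 297, 302, 307, 308, 313, 318, 322, 325, 328, 335, 338, 341, 344, 351, 352, 359, 362, 365, 368, 375, 378, 381, 387, 388, 393, 398, 403, 404, 409, 414, 417, 422, 427, 428, 433, 438, 443, 444, 448, 455, 458, 461, 464, 471, 474, 477, 482, 485, 488, 495, 498, 501, 504, 511]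

def pvTbl : List (Nat × Int) := [(0, 0), (448, 1), (56, 1), (504, 2), (7, 1), (455, 2), (63, 2), (511, 3), (292, 1), (228, 2), (284, 2), (220, 3), (291, 2), (227, 3), (283, 3), (219, 4), (146, 1), (338, 2), (170, 2), (362, 3), (149, 2), (341, 3), (173, 3), (365, 4), (438, 2), (118, 3), (398, 3), (78, 4), (433, 3), (113, 4), (393, 4), (73, 5), (73, 1), (393, 2), (113, 2), (433, 3), (78, 2), (398, 3), (118, 3), (438, 4), (365, 2), (173, 3), (341, 3), (149, 4), (362, 3), (170, 4), (338, 4), (146, 5), (219, 2), (283, 3), (227, 3), (291, 4), (220, 3), (284, 4), (228, 4), (292, 5), (511, 3), (63, 4), (455, 4), (7, 5), (504, 4), (56, 5), (448, 5), (0, 6), (273, 1), (209, 2), (297, 2), (233, 3), (278, 2), (214, 3), (302, 3), (238, 4), (53, 2), (501, 3), (13, 3), (461, 4), (50, 3), (498, 4), (10, 4), (458, 5), (387, 2), (67, 3), (443, 3), (123, 4), (388, 3), (68, 4), (444, 4), (124, 5), (167, 3), (359, 4), (159, 4), (351, 5), (160, 4), (352, 5), (152, 5), (344, 6), (344, 2),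 (152, 3), (352, 3), (160, 4), (351, 3), (159, 4), (359, 4), (167, 5), (124, 3), (444, 4), (68, 4), (388, 5), (123, 4), (443, 5), (67, 5), (387, 6), (458, 3), (10, 4), (498, 4), (50, 5), (461, 4), (13, 5), (501, 5), (53, 6), (238, 4), (302, 5), (214, 5), (278, 6), (233, 5), (297, 6), (209, 6), (273, 7), (84, 1), (404, 2), (108, 2), (428, 3), (83, 2), (403, 3), (107, 3), (427, 4), (368, 2), (176, 3), (328, 3), (136, 4), (375, 3), (183, 4), (335, 4), (143, 5), (198, 2), (262, 3), (254, 3), (318, 4), (193, 3), (257, 4), (249, 4), (313, 5), (482, 3), (34, 4), (474, 4), (26, 5), (485, 4), (37, 5), (477, 5), (29, 6), (29, 2), (477, 3), (37, 3), (485, 4), (26, 3), (474, 4), (34, 4), (482, 5), (313, 3), (249, 4), (257, 4), (193, 5), (318, 4), (254, 5), (262, 5), (198, 6), (143, 3), (335, 4), (183, 4), (375, 5), (136, 4), (328, 5), (176, 5), (368, 6), (427, 4), (107, 5), (403, 5), (83, 6), (428, 5), (108, 6), (404, 6), (84, 7), (325, 2), (133, 3), (381, 3), (189, 4), (322, 3),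 (130, 4), (378, 4), (186, 5), (97, 3), (417, 4), (89, 4), (409, 5), (102, 4), (422, 5), (94, 5), (414, 6), (471, 3), (23, 4), (495, 4), (47, 5), (464, 4), (16, 5), (488, 5), (40, 6), (243, 4), (307, 5), (203, 5), (267, 6), (244, 5), (308, 6), (204, 6), (268, 7), (268, 3), (204, 4), (308, 4), (244, 5), (267, 4), (203, 5), (307, 5), (243, 6), (40, 4), (488, 5), (16, 5), (464, 6), (47, 5), (495, 6), (23, 6), (471, 7), (414, 4), (94, 5), (422, 5), (102, 6), (409, 5), (89, 6), (417, 6), (97, 7), (186, 5), (378, 6), (130, 6), (322, 7), (189, 6), (381, 7), (133, 7), (325, 8)]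

def tableAlt (n : Nat) : Int :=
  pvTbl.foldl (fun (best : Int) (p : Nat × Int) =>
    if n ^^^ p.1 = 0 ∨ n ^^^ p.1 = 511 then
      if best = -1 ∨ p.2 < best then p.2 else best
    else best) (-1)

theorem d5 : ∀ n ∈ pvV, natLoop 1024 (1 <<< n) [(n, 0)] [] = tableAlt n := by decide

theorem f2 : ∀ v ∈ pvV, ∀ mk ∈ pvMasks, v ^^^ mk ∈ pvV := by decide
theorem f3 : ∀ v ∈ pvV, v ^^^ 511 ∈ pvV := by decide
theorem f6 : ∀ p ∈ pvTbl, p.1 ∈ pvV := by decide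

-- === B-side bridge: altFrom = tableAlt ===

def pvXF (m : Nat) : Nat :=
  (List.range 8).foldl (fun (t : Nat) (i : Nat) =>
    if (m >>> i) &&& 1 = 1 then t ^^^ pvMasks.getD i 0 else t) 0

theorem xorFold (P : Nat → Prop) [DecidablePred P] (a : Nat → Nat) :
    ∀ (l : List Nat) (s : Nat),
      l.foldl (fun t i => if P i then t ^^^ a i else t) s
        = s ^^^ l.foldl (fun t i => if P i then t ^^^ a i else t) 0 := by
  intro l
  induction l with
  | nil => intro s; simp
  | cons i l ih =>
    intro s
    simp only [List.foldl_cons]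
    rw [ih (if P i then s ^^^ a i else s), ih (if P i then 0 ^^^ a i else 0)]
    by_cases h : P i <;> simp [h, Nat.xor_assoc]

theorem pvTblEq : pvTbl = (List.range 256).map (fun m => (pvXF m, altCount m)) := by decide

theorem altFrom_eq_tableAlt (n : Nat) : altFrom n = tableAlt n := by
  unfold altFrom tableAlt
  rw [pvTblEq, List.foldl_map]
  congr 1
  funext best m
  rw [xorFold (fun i => (m >>> i) &&& 1 = 1) (fun i => pvMasks.getD i 0) (List.range 8) n]
  rfl

theorem foldl_const {α β : Type} (f : β → α → β) (l : List α) (b : β)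
    (h : ∀ x ∈ l, ∀ y, f y x = y) : l.foldl f b = b := by
  induction l generalizing b with
  | nil => rfl
  | cons a l ih => rw [List.foldl_cons, h a (by simp)]; exact ih _ (fun x hx y => h x (by simp [hx]) y)

theorem tableAlt_unreach (n : Nat) (hn : n ∉ pvV) : tableAlt n = -1 := by
  unfold tableAlt
  apply foldl_const
  intro p hp y
  have h1 : p.1 ∈ pvV := f6 p hp
  have hno : ¬ (n ^^^ p.1 = 0 ∨ n ^^^ p.1 = 511) := by
    rintro (h | h)
    · exact hn (Nat.xor_eq_zero_iff.mp h ▸ h1)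
    · have h2 : n = 511 ^^^ p.1 := by
        have := congrArg (· ^^^ p.1) h
        simpa [Nat.xor_xor_cancel_right] using this
      have h3 : n ∈ pvV := by
        rw [h2, Nat.xor_comm]
        exact f3 p.1 h1
      exact hn h3
  rw [if_neg hno]

-- === A-side bridge: bfsLoop = natLoop ===

def castP (p : Nat × Int) : Int × Int := ((p.1 : Int), p.2)

def VRel (v : List Bool) (m : Nat) : Prop :=
  v.length = 512 ∧ ∀ i : Nat, i < 512 → PySem.List.pyGetD v (i : Int) false = m.testBit i

theorem rel_set {v m} (h : VRel v m) {vs : Nat} (hvs : vs < 512) :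
    VRel (PySem.List.pySetD v (vs : Int) true) (m ||| 1 <<< vs) := by
  obtain ⟨hl, hg⟩ := h
  refine ⟨by rw [PySem.List.length_pySetD, hl], ?_⟩
  intro i hi
  rw [PySem.List.pyGetD_pySetD_natCast v vs i true false (by omega)]
  rw [Nat.testBit_or, Nat.one_shiftLeft, Nat.testBit_two_pow]
  by_cases hiv : i = vs
  · simp [hiv]
  · simp [hiv, hg i hi, Ne.symm hiv]

theorem rel_empty : VRel (List.replicate 512 false) 0 := by
  refine ⟨by simp, ?_⟩
  intro i hi
  rw [PySem.List.pyGetD_natCast, Nat.zero_testBit, List.getD_eq_getElem?_getD,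
    List.getElem?_replicate]
  simp [hi]

theorem rel_init {n : Nat} (hn : n < 512) :
    VRel (PySem.List.pySetD (List.replicate 512 false) (n : Int) true) (1 <<< n) := by
  have := rel_set rel_empty hn
  rwa [Nat.zero_or] at this

theorem hfst : (pvCases.zip pvMasks).map Prod.fst = pvCases := by decide
theorem hsnd : (pvCases.zip pvMasks).map Prod.snd = pvMasks := by decide

theorem foldA_zip {β : Type} (F : β → (Int × Int × Int) → β) (init : β) :
    pvCases.foldl F init = (pvCases.zip pvMasks).foldl (fun st pr => F st pr.1) init := by
  conv_rhs => rw [← List.foldl_map]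
  rw [hfst]

theorem foldN_zip {β : Type} (F : β → Nat → β) (init : β) :
    pvMasks.foldl F init = (pvCases.zip pvMasks).foldl (fun st pr => F st pr.2) init := by
  conv_rhs => rw [← List.foldl_map]
  rw [hsnd]

theorem foldBridge (fuel : Nat) (x : Nat) (hx : x < 512) (c : Int) (rest : List (Nat × Int))
    (hrest : ∀ p ∈ rest, p.1 < 512)
    (IHf : ∀ (f b : List (Nat × Int)) (v : List Bool) (m : Nat), VRel v m →
      (∀ p ∈ f ++ b, p.1 < 512) →
      bfsLoop fuel v ((f ++ b.reverse).map castP) = natLoop fuel m f b) :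
    ∀ (l : List ((Int × Int × Int) × Nat)), (∀ pr ∈ l, pr ∈ pvCases.zip pvMasks) →
    ∀ (v : List Bool) (m : Nat) (nb : List (Nat × Int)), VRel v m → (∀ p ∈ nb, p.1 < 512) →
    bfsLoop fuel
        (l.foldl (fun (st : List Bool × List (Int × Int)) pr =>
          let newArr := change pr.1 (binArr9 ((x : Nat) : Int))
          let vs := intBase2 newArr
          if PySem.List.pyGetD st.1 vs false then st
          else (PySem.List.pySetD st.1 vs true, st.2 ++ [(intBase2 newArr, c + 1)]))
          (v, rest.map castP ++ nb.reverse.map castP)).1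
        (l.foldl (fun (st : List Bool × List (Int × Int)) pr =>
          let newArr := change pr.1 (binArr9 ((x : Nat) : Int))
          let vs := intBase2 newArr
          if PySem.List.pyGetD st.1 vs false then st
          else (PySem.List.pySetD st.1 vs true, st.2 ++ [(intBase2 newArr, c + 1)]))
          (v, rest.map castP ++ nb.reverse.map castP)).2
      = natLoop fuel
        (l.foldl (fun (st : Nat × List (Nat × Int)) pr =>
          let vs := x ^^^ pr.2
          if st.1.testBit vs then st
          else (st.1 ||| (1 <<< vs), (vs, c + 1) :: st.2)) (m, nb)).1
        rest
        (l.foldl (fun (st : Nat × List (Nat × Int)) pr =>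
          let vs := x ^^^ pr.2
          if st.1.testBit vs then st
          else (st.1 ||| (1 <<< vs), (vs, c + 1) :: st.2)) (m, nb)).2 := by
  intro l
  induction l with
  | nil =>
    intro _ v m nb hrel hnb
    simp only [List.foldl_nil]
    rw [← List.map_append]
    exact IHf rest nb v m hrel (by
      intro p hp
      rcases List.mem_append.mp hp with h | h
      · exact hrest p h
      · exact hnb p h)
  | cons pr l ih =>
    intro hl v m nb hrel hnb
    have hpr : pr ∈ pvCases.zip pvMasks := hl pr (by simp)
    have hmk : pr.2 < 512 := f5 _ (zip_snd_mem hpr)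
    have hvs : x ^^^ pr.2 < 512 := xor_lt hx hmk
    simp only [List.foldl_cons, nbr_eq x hx hpr]
    rw [hrel.2 _ hvs]
    by_cases hbit : m.testBit (x ^^^ pr.2)
    · simp only [hbit, if_true]
      exact ih (fun q hq => hl q (by simp [hq])) v m nb hrel hnb
    · simp only [hbit, Bool.false_eq_true, if_false]
      have hq : (rest.map castP ++ nb.reverse.map castP) ++ [(((x ^^^ pr.2 : Nat) : Int), c + 1)]
          = rest.map castP ++ ((x ^^^ pr.2, c + 1) :: nb).reverse.map castP := by
        simp [castP]
      rw [hq]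
      exact ih (fun q hq => hl q (by simp [hq])) _ _ _ (rel_set hrel hvs)
        (by intro p hp
            rcases List.mem_cons.mp hp with h | h
            · rw [h]; exact hvs
            · exact hnb p h)

theorem natLoop_rotate (fuel : Nat) (m : Nat) (b : List (Nat × Int)) (hq : b ≠ []) :
    natLoop (fuel+1) m [] b = natLoop (fuel+1) m b.reverse [] := by
  have hbr : b.reverse ≠ [] := by simpa
  obtain ⟨y, ys, hys⟩ := List.exists_cons_of_ne_nil hbr
  simp only [natLoop, hys, List.isEmpty_nil, List.isEmpty_cons, if_true, Bool.false_eq_true, if_false]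

theorem bridge : ∀ fuel (f b : List (Nat × Int)) (v : List Bool) (m : Nat),
    VRel v m → (∀ p ∈ f ++ b, p.1 < 512) →
    bfsLoop fuel v ((f ++ b.reverse).map castP) = natLoop fuel m f b := by
  intro fuel
  induction fuel with
  | zero => intros; rfl
  | succ fuel IH =>
    have step : ∀ (x : Nat) (c : Int) rest back (v : List Bool) (m : Nat), VRel v m →
        (∀ p ∈ rest ++ back, p.1 < 512) → x < 512 →
        bfsLoop (fuel+1) v ((((x,c) :: rest) ++ back.reverse).map castP)
          = natLoop (fuel+1) m ((x,c) :: rest) back := by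
      intro x c rest back v m hrel hb hx
      have hmap : (((x,c) :: rest) ++ back.reverse).map castP
          = ((x : Int), c) :: (rest ++ back.reverse).map castP := by simp [castP]
      rw [hmap, bfsLoop]
      have hnat : natLoop (fuel+1) m ((x,c) :: rest) back
          = if x = 0 ∨ x = 511 then c else
            (let st := pvMasks.foldl (fun (st : Nat × List (Nat × Int)) mk =>
              let vs := x ^^^ mk
              if st.1.testBit vs then st
              else (st.1 ||| (1 <<< vs), (vs, c + 1) :: st.2)) (m, back)
            natLoop fuel st.1 rest st.2) := by
        simp only [natLoop, List.isEmpty_cons, Bool.false_eq_true, if_false]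
      rw [hnat]
      have hiff : ((x : Int) = 0 ∨ (x : Int) = 511) ↔ (x = 0 ∨ x = 511) := by omega
      by_cases hx0 : x = 0 ∨ x = 511
      · rw [if_pos (hiff.mpr hx0), if_pos hx0]
      · rw [if_neg (fun h => hx0 (hiff.mp h)), if_neg hx0]
        rw [foldA_zip, foldN_zip]
        have hback : ∀ p ∈ back, (p : Nat × Int).1 < 512 := fun p hp => hb p (by simp [hp])
        have hrest : ∀ p ∈ rest, (p : Nat × Int).1 < 512 := fun p hp => hb p (by simp [hp])
        rw [List.map_append]
        exact foldBridge fuel x hx c rest hrest IH (pvCases.zip pvMasks)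
          (fun pr h => h) v m back hrel hback
    intro f b v m hrel hb
    match f with
    | (x,c) :: rest =>
      exact step x c rest b v m hrel
        (fun p hp => hb p (by simp at hp ⊢; tauto)) (hb (x,c) (by simp))
    | [] =>
      match b with
      | [] => rfl
      | q :: qs =>
        rw [natLoop_rotate fuel m (q :: qs) (by simp)]
        obtain ⟨y, ys, hys⟩ := List.exists_cons_of_ne_nil (by simp : (q :: qs).reverse ≠ [])
        have h1 : (([] : List (Nat × Int)) ++ (q :: qs).reverse).map castP
            = ((y :: ys) ++ ([] : List (Nat × Int)).reverse).map castP := by simp [hys]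
        rw [h1, hys]
        obtain ⟨y1, y2⟩ := y
        exact step y1 y2 ys [] v m hrel
          (by intro p hp
              have : p ∈ (q :: qs).reverse := by rw [hys]; simp at hp ⊢; tauto
              exact hb p (by simp at this ⊢; tauto))
          (by have : (y1, y2) ∈ (q :: qs).reverse := by rw [hys]; simp
              have := hb (y1, y2) (by simp at this ⊢; tauto)
              exact this)

-- === unreachable case: the loop drains to -1 ===

def cnt (m : Nat) : Nat := ((Finset.range 512).filter (fun i => m.testBit i)).card

theorem cnt_le (m : Nat) : cnt m ≤ 512 := by
  unfold cnt
  exact (Finset.card_filter_le _ _).trans (by simp)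

theorem cnt_or {m : Nat} {v : Nat} (hv : v < 512) (hb : m.testBit v = false) :
    cnt (m ||| 1 <<< v) = cnt m + 1 := by
  unfold cnt
  have hset : (Finset.range 512).filter (fun i => (m ||| 1 <<< v).testBit i)
      = insert v ((Finset.range 512).filter (fun i => m.testBit i)) := by
    ext i
    simp only [Finset.mem_filter, Finset.mem_insert, Finset.mem_range,
      Nat.testBit_or, Nat.one_shiftLeft, Nat.testBit_two_pow, Bool.or_eq_true,
      decide_eq_true_eq]
    constructor
    · rintro ⟨hi, h | h⟩
      · exact Or.inr ⟨hi, h⟩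
      · exact Or.inl h.symm
    · rintro (h | ⟨hi, h⟩)
      · exact ⟨h ▸ hv, Or.inr h.symm⟩
      · exact ⟨hi, Or.inl h⟩
  rw [hset, Finset.card_insert_of_notMem (by simp [hb])]

theorem cnt_one {n : Nat} (hn : n < 512) : cnt (1 <<< n) = 1 := by
  unfold cnt
  have hset : (Finset.range 512).filter (fun i => (1 <<< n).testBit i) = {n} := by
    ext i
    simp only [Finset.mem_filter, Finset.mem_range, Nat.one_shiftLeft,
      Nat.testBit_two_pow, Finset.mem_singleton, decide_eq_true_eq]
    constructor
    · rintro ⟨_, h⟩; exact h.symm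
    · rintro h; exact ⟨h ▸ hn, h.symm⟩
  rw [hset, Finset.card_singleton]

theorem foldMeasure (x : Nat) (n : Nat) (c : Int) (hx : x < 512) (hxn : x ^^^ n ∈ pvV) :
    ∀ (l : List Nat), (∀ mk ∈ l, mk ∈ pvMasks) →
    ∀ (m : Nat) (nb : List (Nat × Int)),
    (∀ p ∈ nb, p.1 < 512 ∧ p.1 ^^^ n ∈ pvV) →
    (∀ p ∈ (l.foldl (fun (st : Nat × List (Nat × Int)) mk =>
        let vs := x ^^^ mk
        if st.1.testBit vs then st
        else (st.1 ||| (1 <<< vs), (vs, c + 1) :: st.2)) (m, nb)).2, p.1 < 512 ∧ p.1 ^^^ n ∈ pvV) ∧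
    ((l.foldl (fun (st : Nat × List (Nat × Int)) mk =>
        let vs := x ^^^ mk
        if st.1.testBit vs then st
        else (st.1 ||| (1 <<< vs), (vs, c + 1) :: st.2)) (m, nb)).2.length
      + 2 * (512 - cnt ((l.foldl (fun (st : Nat × List (Nat × Int)) mk =>
        let vs := x ^^^ mk
        if st.1.testBit vs then st
        else (st.1 ||| (1 <<< vs), (vs, c + 1) :: st.2)) (m, nb)).1))
      ≤ nb.length + 2 * (512 - cnt m)) := by
  intro l
  induction l with
  | nil => intro _ m nb hnb; exact ⟨hnb, le_refl _⟩
  | cons mk l ih =>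
    intro hl m nb hnb
    have hmk : mk < 512 := f5 mk (hl mk (by simp))
    have hvs : x ^^^ mk < 512 := xor_lt hx hmk
    have hcoset : (x ^^^ mk) ^^^ n ∈ pvV := by
      have : (x ^^^ mk) ^^^ n = (x ^^^ n) ^^^ mk := by
        rw [Nat.xor_right_comm]
      rw [this]
      exact f2 _ hxn mk (hl mk (by simp))
    simp only [List.foldl_cons]
    by_cases hbit : m.testBit (x ^^^ mk)
    · simp only [hbit, if_true]
      exact ih (fun q hq => hl q (by simp [hq])) m nb hnb
    · simp only [hbit, Bool.false_eq_true, if_false]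
      have hco := cnt_or hvs (by simpa using hbit)
      have hcle := cnt_le (m ||| 1 <<< (x ^^^ mk))
      have hcle2 := cnt_le m
      obtain ⟨ha, hb⟩ := ih (fun q hq => hl q (by simp [hq])) (m ||| 1 <<< (x ^^^ mk))
        ((x ^^^ mk, c + 1) :: nb)
        (by intro p hp
            rcases List.mem_cons.mp hp with h | h
            · rw [h]; exact ⟨hvs, hcoset⟩
            · exact hnb p h)
      refine ⟨ha, ?_⟩
      refine hb.trans ?_
      simp only [List.length_cons]
      omega

theorem unreachLoop : ∀ fuel (n : Nat) (m : Nat) (f b : List (Nat × Int)),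
    n < 512 → n ∉ pvV →
    (∀ p ∈ f ++ b, p.1 < 512 ∧ p.1 ^^^ n ∈ pvV) →
    f.length + b.length + 2 * (512 - cnt m) ≤ fuel →
    natLoop fuel m f b = -1 := by
  intro fuel
  induction fuel with
  | zero => intros; rfl
  | succ fuel IH =>
    have step : ∀ (x : Nat) (c : Int) rest back (m : Nat) (n : Nat), n < 512 → n ∉ pvV →
        (∀ p ∈ ((x,c) :: rest) ++ back, p.1 < 512 ∧ p.1 ^^^ n ∈ pvV) →
        ((x,c) :: rest).length + back.length + 2 * (512 - cnt m) ≤ fuel + 1 →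
        natLoop (fuel+1) m ((x,c) :: rest) back = -1 := by
      intro x c rest back m n hn hnv hinv hfuel
      have hxc := hinv (x, c) (by simp)
      have hx : x < 512 := hxc.1
      have hxn : x ^^^ n ∈ pvV := hxc.2
      have hx0 : ¬ (x = 0 ∨ x = 511) := by
        rintro (h | h)
        · subst h
          exact hnv (by simpa [Nat.zero_xor] using hxn)
        · subst h
          have h2 := f3 _ hxn
          have : (511 ^^^ n) ^^^ 511 = n := by
            rw [Nat.xor_comm 511 n, Nat.xor_xor_cancel_right]
          rw [this] at h2
          exact hnv h2
      have hnat : natLoop (fuel+1) m ((x,c) :: rest) back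
          = (let st := pvMasks.foldl (fun (st : Nat × List (Nat × Int)) mk =>
              let vs := x ^^^ mk
              if st.1.testBit vs then st
              else (st.1 ||| (1 <<< vs), (vs, c + 1) :: st.2)) (m, back)
            natLoop fuel st.1 rest st.2) := by
        simp only [natLoop, List.isEmpty_cons, Bool.false_eq_true, if_false, hx0]
      rw [hnat]
      obtain ⟨ha, hb⟩ := foldMeasure x n c hx hxn pvMasks (fun mk h => h) m back
        (fun p hp => hinv p (by simp [hp]))
      exact IH n _ rest _ hn hnv
        (by intro p hp
            rcases List.mem_append.mp hp with h | h
            · exact hinv p (by simp [h])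
            · exact ha p h)
        (by simp only [List.length_cons] at hfuel; omega)
    intro n m f b hn hnv hinv hfuel
    match f with
    | (x,c) :: rest => exact step x c rest b m n hn hnv hinv hfuel
    | [] =>
      match b with
      | [] => rfl
      | q :: qs =>
        rw [natLoop_rotate fuel m (q :: qs) (by simp)]
        obtain ⟨y, ys, hys⟩ := List.exists_cons_of_ne_nil (by simp : (q :: qs).reverse ≠ [])
        rw [hys]
        obtain ⟨y1, y2⟩ := y
        refine step y1 y2 ys [] m n hn hnv ?_ ?_
        · intro p hp
          have hpm : p ∈ (q :: qs).reverse := by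
            rw [hys]; simpa using hp
          exact hinv p (by simp at hpm ⊢; tauto)
        · have hlen : ys.length + 1 = qs.length + 1 := by
            have := congrArg List.length hys
            simpa using this.symm
          simp only [List.length_cons, List.length_nil] at hfuel ⊢
          omega

-- === assembly ===

theorem core_eq (n : Nat) (hn : n < 512) :
    bfsLoop 1024 (PySem.List.pySetD (List.replicate 512 false) (n : Int) true) [((n : Int), 0)]
      = altFrom n := by
  have hb := bridge 1024 [(n, 0)] [] _ _ (rel_init hn) (by simpa using hn)
  simp only [List.append_nil, List.reverse_nil, List.map] at hb
  rw [show castP (n, 0) = ((n : Int), 0) from rfl] at hb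
  rw [hb, altFrom_eq_tableAlt]
  by_cases hv : n ∈ pvV
  · exact d5 n hv
  · rw [tableAlt_unreach n hv]
    exact unreachLoop 1024 n (1 <<< n) [(n, 0)] [] hn hv
      (by intro p hp
          simp only [List.append_nil, List.mem_singleton] at hp
          subst hp
          exact ⟨hn, by simpa [Nat.xor_self] using (by decide : (0:Nat) ∈ pvV)⟩)
      (by simp [cnt_one hn])

-- ===== VERDICT (by name: the statement is the Claim_ definition above) =====
theorem bfs_spec : Claim_equal_bfs := by
  intro arr _ hpre
  obtain ⟨hs, h0, h511⟩ := hpre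
  unfold Spec_bfs bfs bfs_alt
  obtain ⟨w, hw⟩ := Option.isSome_iff_exists.mp hs
  rw [hw] at h0 h511 ⊢
  simp only [Option.getD_some] at h0 h511 ⊢
  have hn : w = ((w.toNat : Nat) : Int) := (Int.toNat_of_nonneg h0).symm
  rw [hn]
  rw [Int.toNat_natCast]
  exact core_eq w.toNat (by omega)
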